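-- pv_equiv track=rewrite | github.com/affinity96/algorithm_study | 2573.py | aYearLater
-- ===== SOURCE A (Python) =====
-- def aYearLater(iceberg,N,M):
--     #1년후 빙산 초기화
--     next_iceberg = [[0]*M for n in range(N)]
--     #동서남북 확인해봐야지
--     check_around_list = [[-1,0],[0,-1],[1,0],[0,1]]
--     for x in range(N):
--         for y in range(M):
--             if iceberg[x][y] >0:
--                 #동서남북중 몇개에 0있나 (얼마만큼빼야하나) 카운트
--                 down_count = 0
--                 for change in check_around_list:
--                     a = x+change[0]
--                     b = y+change[1]
--                     #범위 밖이면 pass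
--                     if a<0 or b<0 or a>=N or b>=M:
--                         continue
--                     else :
--                         #주변에 0이있을때마다 count++
--                         if iceberg[a][b] == 0: down_count +=1
--                 next_iceberg[x][y] =iceberg[x][y]- down_count
--                 #0보다 작으면 걍 0
--                 if next_iceberg[x][y] < 0 : next_iceberg[x][y] = 0
--
--     return next_iceberg
-- ===== SOURCE B (Python) =====
-- def aYearLater(iceberg, N, M):
--     # Row-shift stencil: build a 0/1 "is water" grid once, then form each output row
--     # by zipping the row above, below, and the row shifted left/right, so the per-cell
--     # four-neighbour bounds checks of A disappear.
--     z = [[1 if iceberg[x][y] == 0 else 0 for y in range(M)] for x in range(N)]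
--     if not z:
--         return []
--     zero_row = [0] * max(M, 0)
--     result = []
--     for x in range(N):
--         up = z[x - 1] if x > 0 else zero_row
--         down = z[x + 1] if x + 1 < N else zero_row
--         cur = z[x]
--         left = ([0] + cur)[:M]
--         right = (cur + [0])[1:]
--         vals = [iceberg[x][y] for y in range(M)]
--         melt = [u + d + l + r for (u, d, l, r) in zip(up, down, left, right)]
--         result.append([max(v - w, 0) if v > 0 else 0
--                        for (v, w) in zip(vals, melt)])
--     return result
-- ===== Notes on version B (the rewrite author's own statement) =====
-- stated objective: alternative
-- what changed: A gathers per live cell, counting zero neighbours with four per-cell bounds checks; B builds a 0/1 water-indicator grid once and forms each output row by zipping the rows above/below and the current row shifted left/right (a row-shift stencil), so no per-neighbour index bounds checks remain.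
import Mathlib
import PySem

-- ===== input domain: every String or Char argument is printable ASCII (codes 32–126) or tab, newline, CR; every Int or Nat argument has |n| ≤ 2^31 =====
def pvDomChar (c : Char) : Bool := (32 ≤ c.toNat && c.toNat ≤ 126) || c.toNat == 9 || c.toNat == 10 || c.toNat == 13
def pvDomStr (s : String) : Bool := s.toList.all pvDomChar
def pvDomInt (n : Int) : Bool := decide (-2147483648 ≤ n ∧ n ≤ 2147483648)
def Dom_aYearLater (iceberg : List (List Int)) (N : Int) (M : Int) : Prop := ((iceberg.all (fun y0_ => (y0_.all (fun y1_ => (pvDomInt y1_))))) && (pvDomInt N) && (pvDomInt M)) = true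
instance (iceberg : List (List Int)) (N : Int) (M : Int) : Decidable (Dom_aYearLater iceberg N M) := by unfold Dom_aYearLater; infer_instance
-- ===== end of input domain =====

-- B replaces A's per-cell four-neighbour gathering (with per-neighbour bounds checks)
-- by a row-shift stencil: a 0/1 water grid is built once and each output row is formed
-- by zipping the rows above/below and the row shifted left/right (objective: alternative).

-- ===== PORT A =====
-- iceberg[x][y]; exact on in-range indices — Pre_ keeps every read of A in range
def aGet (g : List (List Int)) (x y : Int) : Int :=
  (PySem.List.pyGet? ((PySem.List.pyGet? g x).getD []) y).getD 0

-- next_iceberg[x][y] = v; exact for A's writes, which are always in range (0 ≤ x < N, 0 ≤ y < M into the N×M zero grid)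
def aSet2 (g : List (List Int)) (x y : Int) (v : Int) : List (List Int) :=
  g.set x.toNat ((g.getD x.toNat []).set y.toNat v)

-- body of A's inner loop over y (kept as a named helper; code is A's, step for step)
def aInnerStep (iceberg : List (List Int)) (N M x : Int) (g : List (List Int)) (y : Int) : List (List Int) :=
  if aGet iceberg x y > 0 then
    let down_count := ([(-1, 0), (0, -1), (1, 0), (0, 1)] : List (Int × Int)).foldl (fun c change =>
      let a := x + change.1
      let b := y + change.2
      if a < 0 ∨ b < 0 ∨ a ≥ N ∨ b ≥ M then c
      else if aGet iceberg a b = 0 then c + 1 else c) 0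
    let g1 := aSet2 g x y (aGet iceberg x y - down_count)
    if aGet g1 x y < 0 then aSet2 g1 x y 0 else g1
  else g

-- body of A's outer loop over x
def aOuterStep (iceberg : List (List Int)) (N M : Int) (g : List (List Int)) (x : Int) : List (List Int) :=
  (PySem.List.pyRange 0 M 1).foldl (aInnerStep iceberg N M x) g

def aYearLater (iceberg : List (List Int)) (N : Int) (M : Int) : List (List Int) :=
  let next_iceberg := (PySem.List.pyRange 0 N 1).map (fun _ => List.replicate M.toNat (0 : Int))
  (PySem.List.pyRange 0 N 1).foldl (aOuterStep iceberg N M) next_iceberg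

-- ===== PORT B =====
-- iceberg[x][y] (B's comprehensions), exact on the in-range reads Pre_ guarantees
def bGet (g : List (List Int)) (x y : Int) : Int :=
  (PySem.List.pyGet? ((PySem.List.pyGet? g x).getD []) y).getD 0

-- one output row of B (named helper; code is B's, step for step)
def bRow (iceberg : List (List Int)) (N M : Int) (z : List (List Int)) (zero_row : List Int) (x : Int) : List Int :=
  let up := if x > 0 then (PySem.List.pyGet? z (x - 1)).getD [] else zero_row
  let down := if x + 1 < N then (PySem.List.pyGet? z (x + 1)).getD [] else zero_row
  let cur := (PySem.List.pyGet? z x).getD []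
  let left := PySem.List.slice ((0 : Int) :: cur) none (some M)
  let right := PySem.List.slice (cur ++ [(0 : Int)]) (some 1) none
  let vals := (PySem.List.pyRange 0 M 1).map (fun y => bGet iceberg x y)
  let melt := (((up.zip down).zip left).zip right).map (fun p => p.1.1.1 + p.1.1.2 + p.1.2 + p.2)
  (vals.zip melt).map (fun p => if p.1 > 0 then max (p.1 - p.2) 0 else 0)

def aYearLater_alt (iceberg : List (List Int)) (N : Int) (M : Int) : List (List Int) :=
  let z := (PySem.List.pyRange 0 N 1).map (fun x =>
    (PySem.List.pyRange 0 M 1).map (fun y => if bGet iceberg x y = 0 then (1 : Int) else 0))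
  if z = [] then []
  else
    let zero_row := List.replicate (max M 0).toNat (0 : Int)
    (PySem.List.pyRange 0 N 1).foldl (fun result x => result ++ [bRow iceberg N M z zero_row x]) []

-- ===== PRECONDITION & SPEC =====
-- Pre_ excludes exactly the inputs where A raises IndexError: a positive N×M scan over a grid
-- with fewer than N rows, or a row among the first N shorter than M.
def Pre_aYearLater (iceberg : List (List Int)) (N : Int) (M : Int) : Prop :=
  N ≤ 0 ∨ M ≤ 0 ∨ (N ≤ (iceberg.length : Int) ∧ ∀ r ∈ iceberg.take N.toNat, M ≤ (r.length : Int))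
instance (iceberg : List (List Int)) (N : Int) (M : Int) : Decidable (Pre_aYearLater iceberg N M) := by unfold Pre_aYearLater; infer_instance

def pvWitness_aYearLater : List (List Int) × Int × Int := ([[1, 2], [0, 3]], 2, 2)

def Spec_aYearLater (iceberg : List (List Int)) (N : Int) (M : Int) (out : List (List Int)) : Prop := out = aYearLater_alt iceberg N M
instance (iceberg : List (List Int)) (N : Int) (M : Int) (out : List (List Int)) : Decidable (Spec_aYearLater iceberg N M out) := by unfold Spec_aYearLater; infer_instance

-- ===== CLAIM (what is proved, stated in full; the proofs are below) =====
def Claim_equal_aYearLater : Prop := ∀ (iceberg : List (List Int)) (N : Int) (M : Int), Dom_aYearLater iceberg N M → Pre_aYearLater iceberg N M → Spec_aYearLater iceberg N M (aYearLater iceberg N M)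

-- ===== LEMMAS AND PROOFS =====

-- ---- proof-side helpers ----

-- the down_count A computes at (x,y), written as a sum of the four neighbour tests
def zcA (ice : List (List Int)) (N M x y : Int) : Int :=
  (if x + -1 < 0 ∨ y + 0 < 0 ∨ x + -1 ≥ N ∨ y + 0 ≥ M then 0 else if aGet ice (x + -1) (y + 0) = 0 then 1 else 0)
  + (if x + 0 < 0 ∨ y + -1 < 0 ∨ x + 0 ≥ N ∨ y + -1 ≥ M then 0 else if aGet ice (x + 0) (y + -1) = 0 then 1 else 0)
  + (if x + 1 < 0 ∨ y + 0 < 0 ∨ x + 1 ≥ N ∨ y + 0 ≥ M then 0 else if aGet ice (x + 1) (y + 0) = 0 then 1 else 0)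
  + (if x + 0 < 0 ∨ y + 1 < 0 ∨ x + 0 ≥ N ∨ y + 1 ≥ M then 0 else if aGet ice (x + 0) (y + 1) = 0 then 1 else 0)

-- the value A stores at cell (x,y)
def cellF (ice : List (List Int)) (N M x y : Int) : Int :=
  if aGet ice x y > 0 then
    (if aGet ice x y - zcA ice N M x y < 0 then 0 else aGet ice x y - zcA ice N M x y)
  else 0

def masterGrid (ice : List (List Int)) (N M : Int) : List (List Int) :=
  (List.range N.toNat).map (fun (i : Nat) => (List.range M.toNat).map (fun (j : Nat) => cellF ice N M (i : Int) (j : Int)))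

-- row-level version of A's inner-loop body
def rowStepF (ice : List (List Int)) (N M x : Int) (r : List Int) (y : Int) : List Int :=
  if aGet ice x y > 0 then r.set y.toNat (cellF ice N M x y) else r

def rowFoldF (ice : List (List Int)) (N M x : Int) (r : List Int) : List Int :=
  (PySem.List.pyRange 0 M 1).foldl (rowStepF ice N M x) r

lemma bGet_eq_aGet : @bGet = @aGet := rfl

set_option maxHeartbeats 1000000 in
lemma downA_eq (ice : List (List Int)) (N M x y : Int) :
    ([(-1, 0), (0, -1), (1, 0), (0, 1)] : List (Int × Int)).foldl (fun c change =>
        let a := x + change.1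
        let b := y + change.2
        if a < 0 ∨ b < 0 ∨ a ≥ N ∨ b ≥ M then c
        else if aGet ice a b = 0 then c + 1 else c) 0 = zcA ice N M x y := by
  simp only [List.foldl]
  unfold zcA
  split_ifs <;> ring

lemma length_rowStepF (ice : List (List Int)) (N M x : Int) (r : List Int) (y : Int) :
    (rowStepF ice N M x r y).length = r.length := by
  unfold rowStepF; split <;> simp

lemma length_foldl_rowStep (ice : List (List Int)) (N M x : Int) :
    ∀ (ys : List Int) (r : List Int), (ys.foldl (rowStepF ice N M x) r).length = r.length := by
  intro ys
  induction ys with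
  | nil => intro r; rfl
  | cons y ys ih => intro r; rw [List.foldl_cons, ih, length_rowStepF]

lemma length_rowFoldF (ice : List (List Int)) (N M x : Int) (r : List Int) :
    (rowFoldF ice N M x r).length = r.length := length_foldl_rowStep ice N M x _ r

lemma aGet_aSet2_self (g : List (List Int)) (x y : Int) (v : Int)
    (hx0 : 0 ≤ x) (hy0 : 0 ≤ y) (hx : x.toNat < g.length) (hy : y.toNat < (g.getD x.toNat []).length) :
    aGet (aSet2 g x y v) x y = v := by
  unfold aGet aSet2
  rw [PySem.List.pyGet?_of_nonneg _ hx0]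
  rw [List.getElem?_set_self hx]
  simp only [Option.getD_some]
  rw [PySem.List.pyGet?_of_nonneg _ hy0]
  rw [List.getElem?_set_self (by simpa using hy)]
  simp

lemma aSet2_aSet2 (g : List (List Int)) (x y : Int) (v w : Int) (hx : x.toNat < g.length) :
    aSet2 (aSet2 g x y v) x y w = aSet2 g x y w := by
  unfold aSet2
  simp [List.getD_eq_getElem?_getD, List.getElem?_set_self hx, List.set_set]

lemma stepA_eq (ice : List (List Int)) (N M x y : Int) (g : List (List Int))
    (hx0 : 0 ≤ x) (hy0 : 0 ≤ y) (hx : x.toNat < g.length) (hy : y.toNat < (g.getD x.toNat []).length) :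
    aInnerStep ice N M x g y
    = if aGet ice x y > 0 then g.set x.toNat ((g.getD x.toNat []).set y.toNat (cellF ice N M x y)) else g := by
  unfold aInnerStep
  by_cases h : aGet ice x y > 0
  · rw [if_pos h, if_pos h]
    simp only [downA_eq]
    have hset : aGet (aSet2 g x y (aGet ice x y - zcA ice N M x y)) x y
        = aGet ice x y - zcA ice N M x y := aGet_aSet2_self g x y _ hx0 hy0 hx hy
    rw [hset]
    by_cases h2 : aGet ice x y - zcA ice N M x y < 0
    · rw [if_pos h2, aSet2_aSet2 g x y _ _ hx]
      unfold aSet2 cellF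
      rw [if_pos h, if_pos h2]
    · rw [if_neg h2]
      unfold aSet2 cellF
      rw [if_pos h, if_neg h2]
  · rw [if_neg h, if_neg h]

lemma innerA (ice : List (List Int)) (N M x : Int) (hx0 : 0 ≤ x) :
    ∀ (ys : List Int) (g : List (List Int)), x.toNat < g.length →
    (∀ y ∈ ys, 0 ≤ y ∧ y.toNat < (g.getD x.toNat []).length) →
    ys.foldl (aInnerStep ice N M x) g
    = g.set x.toNat (ys.foldl (rowStepF ice N M x) (g.getD x.toNat [])) := by
  intro ys
  induction ys with
  | nil =>
    intro g hx _
    simp only [List.foldl_nil]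
    conv_lhs => rw [← List.set_getElem_self (show x.toNat < g.length from hx)]
    congr 1
    rw [List.getD_eq_getElem?_getD]
    simp [List.getElem?_eq_getElem hx]
  | cons y ys ih =>
    intro g hx hys
    rw [List.foldl_cons, List.foldl_cons]
    obtain ⟨hy0, hylen⟩ := hys y List.mem_cons_self
    rw [stepA_eq ice N M x y g hx0 hy0 hx hylen]
    by_cases h : aGet ice x y > 0
    · rw [if_pos h]
      set r' := (g.getD x.toNat []).set y.toNat (cellF ice N M x y) with hr'
      have hx' : x.toNat < (g.set x.toNat r').length := by simpa using hx
      have hgd : (g.set x.toNat r').getD x.toNat [] = r' := by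
        rw [List.getD_eq_getElem?_getD, List.getElem?_set_self hx]; rfl
      have hys' : ∀ y' ∈ ys, 0 ≤ y' ∧ y'.toNat < ((g.set x.toNat r').getD x.toNat []).length := by
        intro y' hy'
        obtain ⟨h1, h2⟩ := hys y' (List.mem_cons_of_mem _ hy')
        refine ⟨h1, ?_⟩
        rw [hgd, hr']
        simpa using h2
      rw [ih (g.set x.toNat r') hx' hys', hgd, List.set_set]
      have hrs : rowStepF ice N M x (g.getD x.toNat []) y = r' := by
        unfold rowStepF; rw [if_pos h]
      rw [hrs]
    · rw [if_neg h]
      rw [ih g hx (fun y' hy' => hys y' (List.mem_cons_of_mem _ hy'))]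
      have hrs : rowStepF ice N M x (g.getD x.toNat []) y = g.getD x.toNat [] := by
        unfold rowStepF; rw [if_neg h]
      rw [hrs]

lemma foldl_setIf {α : Type} (c : Nat → Prop) [DecidablePred c] (φ : Nat → α) :
    ∀ (n k : Nat) (l : List α), k + n ≤ l.length → ∀ (j : Nat),
    ((List.range' k n).foldl (fun acc i => if c i then acc.set i (φ i) else acc) l)[j]?
    = if k ≤ j ∧ j < k + n ∧ c j then some (φ j) else l[j]? := by
  intro n
  induction n with
  | zero =>
    intro k l _ j
    rw [if_neg (by rintro ⟨h1, h2, _⟩; omega)]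
    rfl
  | succ n ih =>
    intro k l hlen j
    rw [List.range'_succ, List.foldl_cons]
    set l' := if c k then l.set k (φ k) else l with hl'
    have hlen' : l'.length = l.length := by rw [hl']; split <;> simp
    rw [ih (k + 1) l' (by omega) j]
    by_cases hj : j = k
    · subst hj
      rw [if_neg (by rintro ⟨h1, _, _⟩; omega)]
      by_cases hc : c j
      · rw [if_pos ⟨le_refl j, by omega, hc⟩, hl', if_pos hc,
          List.getElem?_set_self (by omega)]
      · rw [if_neg (by rintro ⟨_, _, h⟩; exact hc h), hl', if_neg hc]
    · have hl'j : l'[j]? = l[j]? := by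
        rw [hl']; split
        · exact List.getElem?_set_ne (fun h => hj h.symm)
        · rfl
      rw [hl'j]
      by_cases hin : k + 1 ≤ j ∧ j < k + 1 + n ∧ c j
      · rw [if_pos hin, if_pos ⟨by omega, by omega, hin.2.2⟩]
      · rw [if_neg hin, if_neg (by rintro ⟨h1, h2, h3⟩; exact hin ⟨by omega, by omega, h3⟩)]

lemma rowFold_getElem? (ice : List (List Int)) (N M x : Int) (r : List Int)
    (hr : r.length = M.toNat) (j : Nat) :
    (rowFoldF ice N M x r)[j]? = if j < M.toNat ∧ aGet ice x (j : Int) > 0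
      then some (cellF ice N M x (j : Int)) else r[j]? := by
  unfold rowFoldF
  rw [PySem.List.pyRange_one, List.foldl_map]
  have hfun : (fun (r : List Int) (k : Nat) => rowStepF ice N M x r ((0 : Int) + (k : Int)))
      = fun (r : List Int) (k : Nat) => if aGet ice x (k : Int) > 0 then r.set k (cellF ice N M x (k : Int)) else r := by
    funext r k
    unfold rowStepF
    simp
  rw [hfun]
  have := foldl_setIf (fun k => aGet ice x (k : Int) > 0) (fun k => cellF ice N M x (k : Int))
    ((M - 0).toNat) 0 r (by simpa using hr.ge) j
  rw [List.range_eq_range'] at *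
  simp only [Int.sub_zero] at this ⊢
  rw [this]
  by_cases hm : j < M.toNat ∧ aGet ice x (j : Int) > 0
  · rw [if_pos ⟨by omega, by omega, hm.2⟩, if_pos hm]
  · rw [if_neg (by rintro ⟨_, h2, h3⟩; exact hm ⟨by omega, h3⟩), if_neg hm]

lemma outerA (ice : List (List Int)) (N M : Int) :
    ∀ (n k : Nat) (g : List (List Int)), k + n ≤ g.length → (∀ r ∈ g, r.length = M.toNat) → ∀ (j : Nat),
    ((List.range' k n).foldl (fun acc (i : Nat) => aOuterStep ice N M acc (i : Int)) g)[j]?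
    = if k ≤ j ∧ j < k + n then some (rowFoldF ice N M (j : Int) ((g[j]?).getD [])) else g[j]? := by
  intro n
  induction n with
  | zero =>
    intro k g _ _ j
    rw [if_neg (by rintro ⟨h1, h2⟩; omega)]
    rfl
  | succ n ih =>
    intro k g hlen hrows j
    rw [List.range'_succ, List.foldl_cons]
    have hk : k < g.length := by omega
    have hstep : aOuterStep ice N M g (k : Int)
        = g.set k (rowFoldF ice N M (k : Int) (g.getD k [])) := by
      unfold aOuterStep
      have := innerA ice N M (k : Int) (by positivity) (PySem.List.pyRange 0 M 1) g
        (by simpa using hk)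
        (by
          intro y hy
          obtain ⟨h1, h2⟩ := PySem.List.mem_pyRange_one.mp hy
          refine ⟨h1, ?_⟩
          have hrow : (g.getD k []).length = M.toNat := by
            rw [List.getD_eq_getElem?_getD, List.getElem?_eq_getElem hk]
            exact hrows _ (List.getElem_mem hk)
          simp only [Int.toNat_natCast]
          rw [hrow]
          omega)
      simpa [rowFoldF] using this
    rw [hstep]
    set g' := g.set k (rowFoldF ice N M (k : Int) (g.getD k [])) with hg'
    have hrows' : ∀ r ∈ g', r.length = M.toNat := by
      intro r hr
      rcases List.mem_or_eq_of_mem_set hr with h | h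
      · exact hrows r h
      · subst h
        rw [length_rowFoldF, List.getD_eq_getElem?_getD, List.getElem?_eq_getElem hk]
        exact hrows _ (List.getElem_mem hk)
    rw [ih (k + 1) g' (by simp [hg']; omega) hrows' j]
    by_cases hj : j = k
    · subst hj
      rw [if_neg (by rintro ⟨h1, _⟩; omega), if_pos ⟨le_refl j, by omega⟩, hg',
        List.getElem?_set_self hk]
      rw [List.getD_eq_getElem?_getD]
    · have hgj : g'[j]? = g[j]? := by
        rw [hg']
        exact List.getElem?_set_ne (fun h => hj h.symm)
      rw [hgj]
      by_cases hin : k + 1 ≤ j ∧ j < k + 1 + n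
      · rw [if_pos hin, if_pos ⟨by omega, by omega⟩]
      · rw [if_neg hin, if_neg (by rintro ⟨h1, h2⟩; exact hin ⟨by omega, by omega⟩)]

lemma rowA_master (ice : List (List Int)) (N M : Int) (i : Nat) :
    rowFoldF ice N M (i : Int) (List.replicate M.toNat (0 : Int))
    = (List.range M.toNat).map (fun (j : Nat) => cellF ice N M (i : Int) (j : Int)) := by
  apply List.ext_getElem?
  intro j
  rw [rowFold_getElem? ice N M _ _ (by simp) j]
  by_cases hj : j < M.toNat
  · by_cases hc : aGet ice (i : Int) (j : Int) > 0
    · rw [if_pos ⟨hj, hc⟩]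
      simp [hj]
    · rw [if_neg (by rintro ⟨_, h⟩; exact hc h)]
      simp only [List.getElem?_replicate, if_pos hj, List.getElem?_map, List.getElem?_range hj,
        Option.map_some]
      unfold cellF
      rw [if_neg hc]
  · rw [if_neg (by rintro ⟨h, _⟩; exact hj h)]
    simp [hj]

lemma A_eq_master (ice : List (List Int)) (N M : Int) :
    aYearLater ice N M = masterGrid ice N M := by
  unfold aYearLater masterGrid
  rw [PySem.List.pyRange_one, List.foldl_map, List.range_eq_range']
  simp only [Int.sub_zero, zero_add]
  apply List.ext_getElem?
  intro j
  rw [outerA ice N M N.toNat 0 _ (by simp) ?hrows j]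
  case hrows =>
    intro r hr
    simp only [List.mem_map] at hr
    obtain ⟨_, _, h⟩ := hr
    rw [← h]
    simp
  by_cases hj : j < N.toNat
  · rw [if_pos ⟨Nat.zero_le j, by omega⟩]
    have h1 : (List.map (fun _ : Int => List.replicate M.toNat (0 : Int))
        (List.map (fun k : Nat => (k : Int)) (List.range' 0 N.toNat)))[j]? = some (List.replicate M.toNat (0 : Int)) := by
      simp [hj]
    rw [h1, List.getElem?_map, List.getElem?_range hj]
    simp only [Option.getD_some, Option.map_some, Option.some_inj]
    exact rowA_master ice N M j
  · rw [if_neg (by rintro ⟨_, h⟩; omega)]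
    rw [List.getElem?_eq_none (by simp; omega), List.getElem?_eq_none (by simp; omega)]

-- B's z grid and zero row, named for the proofs
def zGridP (ice : List (List Int)) (N M : Int) : List (List Int) :=
  (PySem.List.pyRange 0 N 1).map (fun x =>
    (PySem.List.pyRange 0 M 1).map (fun y => if bGet ice x y = 0 then (1 : Int) else 0))

lemma zGridP_getElem? (ice : List (List Int)) (N M : Int) (t : Nat) (ht : t < N.toNat) :
    (zGridP ice N M)[t]? = some ((PySem.List.pyRange 0 M 1).map
      (fun y => if bGet ice (t : Int) y = 0 then (1 : Int) else 0)) := by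
  unfold zGridP
  rw [List.getElem?_map, PySem.List.getElem?_pyRange_one, if_pos (by omega)]
  simp

-- one in-bounds-guarded neighbour indicator (argument syntax matches zcA's terms)
def nb (ice : List (List Int)) (N M a b : Int) : Int :=
  if 0 ≤ a ∧ a < N ∧ 0 ≤ b ∧ b < M then (if aGet ice a b = 0 then (1 : Int) else 0) else 0

lemma nb_pos (ice : List (List Int)) (N M a b : Int) (h : 0 ≤ a ∧ a < N ∧ 0 ≤ b ∧ b < M) :
    nb ice N M a b = if aGet ice a b = 0 then (1 : Int) else 0 := by
  unfold nb; rw [if_pos h]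

lemma nb_zero (ice : List (List Int)) (N M a b : Int) (h : ¬(0 ≤ a ∧ a < N ∧ 0 ≤ b ∧ b < M)) :
    nb ice N M a b = 0 := by
  unfold nb; rw [if_neg h]

set_option maxHeartbeats 1000000 in
lemma zcA_eq_nb (ice : List (List Int)) (N M x y : Int) :
    zcA ice N M x y = nb ice N M (x + -1) (y + 0) + nb ice N M (x + 0) (y + -1)
      + nb ice N M (x + 1) (y + 0) + nb ice N M (x + 0) (y + 1) := by
  unfold zcA nb
  split_ifs <;> omega

lemma hpyM (M : Int) : PySem.List.pyRange 0 M 1 = (List.range M.toNat).map (fun k : Nat => (k : Int)) := by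
  rw [PySem.List.pyRange_one]
  simp

lemma rowB_master (ice : List (List Int)) (N M : Int) (i : Nat) (hi : i < N.toNat) :
    bRow ice N M (zGridP ice N M) (List.replicate (max M 0).toNat (0 : Int)) (i : Int)
    = (List.range M.toNat).map (fun (j : Nat) => cellF ice N M (i : Int) (j : Int)) := by
  unfold bRow
  dsimp only
  by_cases hM : M ≤ 0
  · have h0 : M.toNat = 0 := by omega
    rw [hpyM, h0]
    simp
  · replace hM : 0 < M := by omega
    set mN := M.toNat with hmN
    have hmpos : 0 < mN := by omega
    have hzrow : ∀ (t : Nat), t < N.toNat →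
        (PySem.List.pyGet? (zGridP ice N M) (t : Int)).getD []
        = (List.range mN).map (fun k : Nat => if bGet ice (t : Int) (k : Int) = 0 then (1 : Int) else 0) := by
      intro t ht
      rw [PySem.List.pyGet?_natCast, zGridP_getElem? ice N M t ht]
      rw [hpyM, List.map_map]
      rfl
    have hup : (if (i : Int) > 0 then (PySem.List.pyGet? (zGridP ice N M) ((i : Int) - 1)).getD []
          else List.replicate (max M 0).toNat 0)
        = (List.range mN).map (fun k : Nat => nb ice N M ((i : Int) + -1) ((k : Int) + 0)) := by
      by_cases hi0 : i = 0
      · subst hi0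
        rw [if_neg (by omega)]
        have hz : ∀ k ∈ List.range mN, nb ice N M (((0 : Nat) : Int) + -1) ((k : Int) + 0) = 0 := by
          intro k _
          exact nb_zero _ _ _ _ _ (by rintro ⟨h1, _, _, _⟩; omega)
        rw [List.map_congr_left hz]
        simp [List.eq_replicate_iff]
        omega
      · rw [if_pos (by omega), show ((i : Int) - 1) = ((i - 1 : Nat) : Int) by omega,
          hzrow (i - 1) (by omega)]
        apply List.map_congr_left
        intro k hk
        rw [List.mem_range] at hk
        rw [nb_pos _ _ _ _ _ ⟨by omega, by omega, by omega, by omega⟩]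
        have harg : bGet ice ((i - 1 : Nat) : Int) (k : Int) = aGet ice ((i : Int) + -1) ((k : Int) + 0) := by
          rw [bGet_eq_aGet, show ((i : Int) + -1) = ((i - 1 : Nat) : Int) by omega,
            show ((k : Int) + 0) = (k : Int) by ring]
        rw [harg]
    have hdown : (if (i : Int) + 1 < N then (PySem.List.pyGet? (zGridP ice N M) ((i : Int) + 1)).getD []
          else List.replicate (max M 0).toNat 0)
        = (List.range mN).map (fun k : Nat => nb ice N M ((i : Int) + 1) ((k : Int) + 0)) := by
      by_cases hiN : (i : Int) + 1 < N
      · rw [if_pos hiN, show ((i : Int) + 1) = ((i + 1 : Nat) : Int) by omega,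
          hzrow (i + 1) (by omega)]
        apply List.map_congr_left
        intro k hk
        rw [List.mem_range] at hk
        rw [nb_pos _ _ _ _ _ ⟨by omega, by omega, by omega, by omega⟩]
        have harg : bGet ice ((i + 1 : Nat) : Int) (k : Int) = aGet ice ((i + 1 : Nat) : Int) ((k : Int) + 0) := by
          rw [bGet_eq_aGet, show ((k : Int) + 0) = (k : Int) by ring]
        rw [harg]
      · rw [if_neg hiN]
        have hz : ∀ k ∈ List.range mN, nb ice N M ((i : Int) + 1) ((k : Int) + 0) = 0 := by
          intro k _
          exact nb_zero _ _ _ _ _ (by rintro ⟨_, h2, _, _⟩; omega)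
        rw [List.map_congr_left hz]
        simp [List.eq_replicate_iff]
        omega
    have hcur := hzrow i hi
    have hleft : PySem.List.slice ((0 : Int) :: (PySem.List.pyGet? (zGridP ice N M) (i : Int)).getD []) none (some M)
        = (List.range mN).map (fun k : Nat => nb ice N M ((i : Int) + 0) ((k : Int) + -1)) := by
      rw [hcur, PySem.List.slice_to _ (by omega : (0:Int) ≤ M)]
      apply List.ext_getElem
      · simp [← hmN]
      · intro j h1 h2
        rw [List.getElem_take, List.getElem_map, List.getElem_range]
        rcases Nat.eq_zero_or_pos j with hj0 | hjpos
        · subst hj0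
          rw [List.getElem_cons_zero, nb_zero _ _ _ _ _ (by rintro ⟨_, _, h3, _⟩; omega)]
        · obtain ⟨j', rfl⟩ : ∃ j', j = j' + 1 := ⟨j - 1, by omega⟩
          have hjm : j' + 1 < mN := by simpa using h2
          rw [List.getElem_cons_succ, List.getElem_map, List.getElem_range]
          rw [nb_pos _ _ _ _ _ ⟨by omega, by omega, by omega, by omega⟩]
          have harg : bGet ice (i : Int) ((j' : Nat) : Int) = aGet ice ((i : Int) + 0) (((j' + 1 : Nat) : Int) + -1) := by
            rw [bGet_eq_aGet, show ((i : Int) + 0) = (i : Int) by ring,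
              show (((j' + 1 : Nat) : Int) + -1) = ((j' : Nat) : Int) by omega]
          rw [harg]
    have hright : PySem.List.slice ((PySem.List.pyGet? (zGridP ice N M) (i : Int)).getD [] ++ [(0 : Int)]) (some 1) none
        = (List.range mN).map (fun k : Nat => nb ice N M ((i : Int) + 0) ((k : Int) + 1)) := by
      rw [hcur, PySem.List.slice_from _ (by omega : (0:Int) ≤ 1)]
      apply List.ext_getElem
      · simp
      · intro j h1 h2
        rw [List.getElem_drop, List.getElem_map, List.getElem_range]
        have hjlt : j < mN := by simpa using h2
        by_cases hjm : j + 1 < mN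
        · rw [List.getElem_append_left (by simp; omega)]
          rw [List.getElem_map, List.getElem_range]
          rw [nb_pos _ _ _ _ _ ⟨by omega, by omega, by omega, by omega⟩]
          have harg : bGet ice (i : Int) (((1 : Int).toNat + j : Nat) : Int) = aGet ice ((i : Int) + 0) ((j : Int) + 1) := by
            rw [bGet_eq_aGet, show ((i : Int) + 0) = (i : Int) by ring,
              show ((j : Int) + 1) = (((1 : Int).toNat + j : Nat) : Int) by simp; omega]
          rw [harg]
        · rw [List.getElem_append_right (by simp; omega)]
          rw [nb_zero _ _ _ _ _ (by rintro ⟨_, _, _, h4⟩; omega)]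
          simp
    rw [hup, hdown, hleft, hright, hpyM, List.map_map, ← hmN]
    rw [List.zip_map', List.zip_map', List.zip_map', List.map_map, List.zip_map', List.map_map]
    apply List.map_congr_left
    intro k hk
    rw [List.mem_range] at hk
    simp only [Function.comp]
    unfold cellF
    rw [zcA_eq_nb]
    have hb : bGet ice (i : Int) (k : Int) = aGet ice (i : Int) (k : Int) := rfl
    rw [hb]
    by_cases hv : aGet ice (i : Int) (k : Int) > 0
    · rw [if_pos hv, if_pos hv]
      omega
    · rw [if_neg hv, if_neg hv]

lemma B_eq_master (ice : List (List Int)) (N M : Int) :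
    aYearLater_alt ice N M = masterGrid ice N M := by
  unfold aYearLater_alt masterGrid
  by_cases hz : (PySem.List.pyRange 0 N 1).map (fun x =>
      (PySem.List.pyRange 0 M 1).map (fun y => if bGet ice x y = 0 then (1 : Int) else 0)) = ([] : List (List Int))
  · rw [if_pos hz]
    have hN : N.toNat = 0 := by
      have := congrArg List.length hz
      simpa [PySem.List.length_pyRange_one] using this
    rw [hN]
    rfl
  · rw [if_neg hz]
    rw [PySem.List.foldl_append_singleton_eq_map, List.nil_append]
    apply List.ext_getElem?
    intro i
    rw [List.getElem?_map, List.getElem?_map]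
    by_cases hi : i < N.toNat
    · rw [PySem.List.getElem?_pyRange_one, if_pos (by omega), List.getElem?_range hi]
      simp only [Option.map_some, Option.some_inj, Int.zero_add]
      exact rowB_master ice N M i hi
    · rw [PySem.List.getElem?_pyRange_one, if_neg (by omega), List.getElem?_eq_none (by simp; omega)]
      rfl


-- ===== VERDICT (by name: the statement is the Claim_ definition above) =====
theorem aYearLater_spec : Claim_equal_aYearLater := by
  intro ice N M _ _
  unfold Spec_aYearLater
  rw [A_eq_master, B_eq_master]
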